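-- pv_equiv track=rewrite | github.com/allisoncstafford/advent_of_code | day_8/day8_pt2.py | get_prominent_color
-- ===== SOURCE A (Python) =====
-- def get_prominent_color(layers):
--     """returns the first non-transparent pixel color for each pixel"""
--     final = [3] * len(layers[0])
--     for i in range(len(final)):
--         for layer in layers:
--             if layer[i] != 2:
--                 final[i] = layer[i]
--                 break
--     return final
-- ===== SOURCE B (Python) =====
-- def get_prominent_color(layers):
--     """returns the first non-transparent pixel color for each pixel"""
--     width = len(layers[0])
--     final = [3] * width
--     done = [False] * width
--     for layer in layers:
--         for px in range(width):
--             if not done[px] and layer[px] != 2: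
--                 final[px] = layer[px]
--                 done[px] = True
--     return final
-- ===== Notes on version B (the rewrite author's own statement) =====
-- stated objective: alternative
-- what changed: Layer-major sweep maintaining an explicit done-mask as state, instead of A's pixel-major scan with an inner early-break over layers.
import Mathlib
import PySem

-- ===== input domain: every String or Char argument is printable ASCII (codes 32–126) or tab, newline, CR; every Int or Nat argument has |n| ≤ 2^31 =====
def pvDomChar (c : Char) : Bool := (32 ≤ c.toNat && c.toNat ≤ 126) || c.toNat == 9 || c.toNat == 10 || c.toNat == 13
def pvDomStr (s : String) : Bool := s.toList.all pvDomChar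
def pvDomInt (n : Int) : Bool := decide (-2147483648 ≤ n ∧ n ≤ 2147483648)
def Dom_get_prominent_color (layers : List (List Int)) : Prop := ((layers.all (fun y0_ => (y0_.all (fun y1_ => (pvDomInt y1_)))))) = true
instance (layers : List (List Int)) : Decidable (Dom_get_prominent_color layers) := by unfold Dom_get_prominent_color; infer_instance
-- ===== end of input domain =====

-- B replaces A's pixel-major scan (inner early-break over layers) by a layer-major sweep that
-- maintains an explicit done-mask; equivalence of the two traversal orders is proved on Pre_.

-- ===== PORT A =====
-- inner loop 'for layer in layers: if layer[i] != 2: final[i] = layer[i]; break'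
-- (the 'none' branch is Python's IndexError; Pre_ excludes exactly those inputs)
def pvScanA (layers : List (List Int)) (i : Int) (fin : List Int) : List Int :=
  match layers with
  | [] => fin
  | layer :: rest =>
    match PySem.List.pyGet? layer i with
    | none => fin
    | some v => if v ≠ 2 then PySem.List.pySetD fin i v else pvScanA rest i fin

def get_prominent_color (layers : List (List Int)) : List Int :=
  let final := List.replicate ((PySem.List.pyGet? layers 0).getD []).length (3 : Int)
  (List.range final.length).foldl (fun fin (i : Nat) => pvScanA layers (i : Int) fin) final

-- ===== PORT B =====
-- one layer of B: 'for i in range(len(final)): if not done[i] and layer[i] != 2: …'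
-- (layer.getD i 2 is exact inside Pre_: the guard only reaches layer[i] at in-range i there)
def pvLayerB (n : Nat) (st : List Int × List Bool) (layer : List Int) : List Int × List Bool :=
  (List.range n).foldl (fun st i =>
    if !(st.2.getD i true) && (layer.getD i 2 != 2) then
      (st.1.set i (layer.getD i 2), st.2.set i true)
    else st) st

def get_prominent_color_alt (layers : List (List Int)) : List Int :=
  let n := ((PySem.List.pyGet? layers 0).getD []).length
  (layers.foldl (pvLayerB n) (List.replicate n (3 : Int), List.replicate n false)).1

-- ===== PRECONDITION & SPEC =====
-- Exactly the inputs on which the Python A returns (checked against A by sampling): layers is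
-- non-empty, and at every pixel j the scan over layers meets an in-range non-2 entry before any
-- layer too short at j (otherwise layers[0] or layer[i] raises IndexError).
def Pre_get_prominent_color (layers : List (List Int)) : Prop :=
  layers ≠ [] ∧
  ∀ j < (layers.headD []).length, ∀ t < layers.length,
    (layers.getD t []).length ≤ j →
      ∃ s < t, j < (layers.getD s []).length ∧ (layers.getD s []).getD j 0 ≠ 2

instance (layers : List (List Int)) : Decidable (Pre_get_prominent_color layers) := by
  unfold Pre_get_prominent_color; infer_instance

def pvWitness_get_prominent_color : List (List Int) := [[2, 1], [0, 2]]

def Spec_get_prominent_color (layers : List (List Int)) (out : List Int) : Prop := out = get_prominent_color_alt layers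
instance (layers : List (List Int)) (out : List Int) : Decidable (Spec_get_prominent_color layers out) := by unfold Spec_get_prominent_color; infer_instance

-- ===== CLAIM (what is proved, stated in full; the proofs are below) =====
def Claim_equal_get_prominent_color : Prop := ∀ (layers : List (List Int)), Dom_get_prominent_color layers → Pre_get_prominent_color layers → Spec_get_prominent_color layers (get_prominent_color layers)

-- ===== LEMMAS AND PROOFS =====

-- the first non-transparent entry at pixel j, reading layer[j] as getD j 2 (out of range = skip)
def pvPick (layers : List (List Int)) (j : Nat) : Option Int :=
  match layers with
  | [] => none
  | l :: rest => if l.getD j 2 ≠ 2 then some (l.getD j 2) else pvPick rest j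

-- the per-pixel part of Pre_ : the scan at pixel j never indexes out of range
def pvOk (layers : List (List Int)) (j : Nat) : Prop :=
  ∀ t < layers.length, (layers.getD t []).length ≤ j →
    ∃ s < t, j < (layers.getD s []).length ∧ (layers.getD s []).getD j 0 ≠ 2

theorem pvOk_head {l : List Int} {rest : List (List Int)} {j : Nat}
    (h : pvOk (l :: rest) j) : j < l.length := by
  by_contra hj
  obtain ⟨s, hs, _⟩ := h 0 (by simp) (by simpa using Nat.le_of_not_lt hj)
  omega

theorem pvOk_tail {l : List Int} {rest : List (List Int)} {j : Nat}
    (h : pvOk (l :: rest) j) (h2 : l.getD j 0 = 2) : pvOk rest j := by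
  intro t ht hlen
  obtain ⟨s, hs, hlt, hne⟩ := h (t + 1) (by simpa using ht) (by simpa using hlen)
  match s with
  | 0 => simp at hlt hne; exact absurd h2 hne
  | s' + 1 => exact ⟨s', by omega, by simpa using hlt, by simpa using hne⟩

theorem pvScanA_eq_pick (layers : List (List Int)) (j : Nat) (fin : List Int)
    (h : pvOk layers j) :
    pvScanA layers (j : Int) fin =
      match pvPick layers j with
      | some v => fin.set j v
      | none => fin := by
  induction layers with
  | nil => rfl
  | cons l rest ih =>
    have hj : j < l.length := pvOk_head h
    have hget : PySem.List.pyGet? l (j : Int) = some l[j] := by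
      simp [PySem.List.pyGet?_natCast, List.getElem?_eq_getElem hj]
    have hgd2 : l.getD j 2 = l[j] := List.getD_eq_getElem l 2 hj
    have hgd0 : l.getD j 0 = l[j] := List.getD_eq_getElem l 0 hj
    by_cases hv : l[j] = 2
    · have hpick : pvPick (l :: rest) j = pvPick rest j := by
        simp only [pvPick]; rw [hgd2]; simp [hv]
      rw [hpick, pvScanA, hget]
      simp only [hv, ne_eq, not_true_eq_false, if_false]
      exact ih (pvOk_tail h (by rw [hgd0, hv]))
    · have hpick : pvPick (l :: rest) j = some l[j] := by
        simp only [pvPick]; rw [hgd2]; simp [hv]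
      rw [hpick, pvScanA, hget]
      simp [hv, PySem.List.pySetD_natCast]

-- the pointwise step A's outer loop applies at index i, once pvScanA is characterised
def pvStepPick (layers : List (List Int)) (fin : List Int) (i : Nat) : List Int :=
  match pvPick layers i with
  | some v => fin.set i v
  | none => fin

theorem pvStepPick_none {layers : List (List Int)} {i : Nat} (fin : List Int)
    (hp : pvPick layers i = none) : pvStepPick layers fin i = fin := by
  unfold pvStepPick; rw [hp]

theorem pvStepPick_some {layers : List (List Int)} {i : Nat} {v : Int} (fin : List Int)
    (hp : pvPick layers i = some v) : pvStepPick layers fin i = fin.set i v := by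
  unfold pvStepPick; rw [hp]

theorem pvFoldA_length (layers : List (List Int)) (k : Nat) (fin : List Int) :
    ((List.range k).foldl (pvStepPick layers) fin).length = fin.length := by
  induction k with
  | zero => rfl
  | succ k ih =>
    rw [List.range_succ, List.foldl_append, List.foldl_cons, List.foldl_nil]
    cases hp : pvPick layers k with
    | none => rw [pvStepPick_none _ hp, ih]
    | some v => rw [pvStepPick_some _ hp, List.length_set, ih]

theorem pvFoldA_getElem? (layers : List (List Int)) (k : Nat) (fin : List Int) (j : Nat) :
    ((List.range k).foldl (pvStepPick layers) fin)[j]? =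
      fin[j]?.map (fun x => if j < k then (pvPick layers j).getD x else x) := by
  induction k with
  | zero => simp [Option.map_id']
  | succ k ih =>
    rw [List.range_succ, List.foldl_append, List.foldl_cons, List.foldl_nil]
    cases hp : pvPick layers k with
    | none =>
      rw [pvStepPick_none _ hp, ih]
      by_cases hjk : j = k
      · subst hjk
        cases fin[j]? <;> simp [hp]
      · cases fin[j]? with
        | none => simp
        | some x =>
          simp only [Option.map_some, Option.some.injEq]
          by_cases hj : j < k
          · simp [hj, Nat.lt_succ_of_lt hj]
          · have h1 : ¬ j < k + 1 := by omega
            simp [hj, h1]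
    | some v =>
      rw [pvStepPick_some _ hp]
      by_cases hjk : j = k
      · subst hjk
        by_cases hlen : j < fin.length
        · rw [List.getElem?_set_self (by rw [pvFoldA_length]; exact hlen),
              List.getElem?_eq_getElem hlen]
          simp [hp]
        · rw [List.getElem?_eq_none (by rw [List.length_set, pvFoldA_length]; omega),
              List.getElem?_eq_none (by omega)]
          simp
      · rw [List.getElem?_set_ne (by omega), ih]
        cases fin[j]? with
        | none => simp
        | some x =>
          simp only [Option.map_some, Option.some.injEq]
          by_cases hj : j < k
          · simp [hj, Nat.lt_succ_of_lt hj]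
          · have h1 : ¬ j < k + 1 := by omega
            simp [hj, h1]

-- B's inner step (the lambda of pvLayerB), named so the fold can be reasoned about
def pvStepB (layer : List Int) (st : List Int × List Bool) (i : Nat) : List Int × List Bool :=
  if !(st.2.getD i true) && (layer.getD i 2 != 2) then
    (st.1.set i (layer.getD i 2), st.2.set i true)
  else st

theorem pvLayerB_eq (n : Nat) (st : List Int × List Bool) (layer : List Int) :
    pvLayerB n st layer = (List.range n).foldl (pvStepB layer) st := rfl

theorem pvStepB_pos {layer : List Int} {st : List Int × List Bool} {i : Nat}
    (h : (!(st.2.getD i true) && (layer.getD i 2 != 2)) = true) :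
    pvStepB layer st i = (st.1.set i (layer.getD i 2), st.2.set i true) := by
  unfold pvStepB; rw [if_pos h]

theorem pvStepB_neg {layer : List Int} {st : List Int × List Bool} {i : Nat}
    (h : (!(st.2.getD i true) && (layer.getD i 2 != 2)) = false) :
    pvStepB layer st i = st := by
  unfold pvStepB; rw [h]; simp

-- B's inner loop over range n, characterised pointwise
theorem pvInnerB_spec (layer : List Int) (n : Nat) (st : List Int × List Bool) :
    ((List.range n).foldl (pvStepB layer) st).1.length = st.1.length ∧
    ((List.range n).foldl (pvStepB layer) st).2.length = st.2.length ∧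
    ∀ j : Nat,
      ((List.range n).foldl (pvStepB layer) st).1[j]? =
        st.1[j]?.map (fun x =>
          if j < n ∧ st.2.getD j true = false ∧ layer.getD j 2 ≠ 2 then layer.getD j 2 else x) ∧
      ((List.range n).foldl (pvStepB layer) st).2[j]? =
        st.2[j]?.map (fun b =>
          if j < n ∧ st.2.getD j true = false ∧ layer.getD j 2 ≠ 2 then true else b) := by
  induction n with
  | zero =>
    refine ⟨rfl, rfl, fun j => ?_⟩
    constructor <;> simp
  | succ n ih =>
    obtain ⟨ih1, ih2, ihj⟩ := ih
    rw [List.range_succ, List.foldl_append, List.foldl_cons, List.foldl_nil]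
    have hcur2 : ((List.range n).foldl (pvStepB layer) st).2.getD n true = st.2.getD n true := by
      rw [List.getD_eq_getElem?_getD, (ihj n).2, List.getD_eq_getElem?_getD]
      cases st.2[n]? <;> simp
    by_cases hg : st.2.getD n true = false ∧ layer.getD n 2 ≠ 2
    · have hgb : (!((List.range n).foldl (pvStepB layer) st).2.getD n true
          && (layer.getD n 2 != 2)) = true := by
        rw [hcur2, hg.1]
        simp only [Bool.not_false, Bool.true_and]
        exact bne_iff_ne.mpr hg.2
      rw [pvStepB_pos hgb]
      refine ⟨by simp [ih1], by simp [ih2], fun j => ?_⟩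
      by_cases hjn : j = n
      · subst hjn
        constructor
        · by_cases hlen : j < st.1.length
          · rw [List.getElem?_set_self (by rw [ih1]; exact hlen), List.getElem?_eq_getElem hlen]
            simp only [Option.map_some, Option.some.injEq]
            rw [if_pos ⟨Nat.lt_succ_self _, hg.1, hg.2⟩]
          · rw [List.getElem?_eq_none (by rw [List.length_set, ih1]; omega),
                List.getElem?_eq_none (by omega)]
            simp
        · by_cases hlen : j < st.2.length
          · rw [List.getElem?_set_self (by rw [ih2]; exact hlen), List.getElem?_eq_getElem hlen]
            simp only [Option.map_some, Option.some.injEq]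
            rw [if_pos ⟨Nat.lt_succ_self _, hg.1, hg.2⟩]
          · rw [List.getElem?_eq_none (by rw [List.length_set, ih2]; omega),
                List.getElem?_eq_none (by omega)]
            simp
      · have hiff : ∀ P : Prop, (j < n + 1 ∧ P) ↔ (j < n ∧ P) := by
          intro P; constructor
          · rintro ⟨h1, h2⟩; exact ⟨by omega, h2⟩
          · rintro ⟨h1, h2⟩; exact ⟨by omega, h2⟩
        constructor
        · rw [List.getElem?_set_ne (by omega), (ihj j).1]
          cases st.1[j]? with
          | none => simp
          | some x => simp only [Option.map_some, Option.some.injEq]; rw [if_congr (hiff _) rfl rfl]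
        · rw [List.getElem?_set_ne (by omega), (ihj j).2]
          cases st.2[j]? with
          | none => simp
          | some b => simp only [Option.map_some, Option.some.injEq]; rw [if_congr (hiff _) rfl rfl]
    · have hgb : (!((List.range n).foldl (pvStepB layer) st).2.getD n true
          && (layer.getD n 2 != 2)) = false := by
        rw [hcur2]
        rcases not_and_or.mp hg with h | h
        · have hh : st.2.getD n true = true := by
            cases hhh : st.2.getD n true
            · exact absurd hhh h
            · rfl
          rw [hh]
          simp only [Bool.not_true, Bool.false_and]
        · have hh : layer.getD n 2 = 2 := by by_contra hc; exact h hc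
          rw [Bool.and_eq_false_iff]
          right
          exact bne_eq_false_iff_eq.mpr hh
      rw [pvStepB_neg hgb]
      refine ⟨ih1, ih2, fun j => ?_⟩
      by_cases hjn : j = n
      · subst hjn
        have ha : ¬ (j < j + 1 ∧ st.2.getD j true = false ∧ layer.getD j 2 ≠ 2) := by
          rintro ⟨_, h2⟩; exact hg h2
        have hb : ¬ (j < j ∧ st.2.getD j true = false ∧ layer.getD j 2 ≠ 2) := by
          rintro ⟨_, h2⟩; exact hg h2
        constructor
        · rw [(ihj j).1]
          cases st.1[j]? with
          | none => simp
          | some x =>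
            simp only [Option.map_some, Option.some.injEq]
            rw [if_neg hb, if_neg ha]
        · rw [(ihj j).2]
          cases st.2[j]? with
          | none => simp
          | some b =>
            simp only [Option.map_some, Option.some.injEq]
            rw [if_neg hb, if_neg ha]
      · have hiff : ∀ P : Prop, (j < n ∧ P) ↔ (j < n + 1 ∧ P) := by
          intro P; constructor
          · rintro ⟨h1, h2⟩; exact ⟨by omega, h2⟩
          · rintro ⟨h1, h2⟩; exact ⟨by omega, h2⟩
        constructor
        · rw [(ihj j).1]
          cases st.1[j]? with
          | none => simp
          | some x =>
            simp only [Option.map_some, Option.some.injEq]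
            rw [if_congr (hiff _) rfl rfl]
        · rw [(ihj j).2]
          cases st.2[j]? with
          | none => simp
          | some b =>
            simp only [Option.map_some, Option.some.injEq]
            rw [if_congr (hiff _) rfl rfl]

-- B's outer loop over the layers, characterised pointwise against pvPick
theorem pvOuterB_spec (n : Nat) (layers : List (List Int)) :
    ∀ st : List Int × List Bool, st.1.length = n → st.2.length = n →
    (layers.foldl (pvLayerB n) st).1.length = n ∧
    (layers.foldl (pvLayerB n) st).2.length = n ∧
    ∀ j : Nat, j < n →
      (layers.foldl (pvLayerB n) st).1.getD j 0 =
        (if st.2.getD j true then st.1.getD j 0 else (pvPick layers j).getD (st.1.getD j 0)) ∧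
      (layers.foldl (pvLayerB n) st).2.getD j true =
        (st.2.getD j true || (pvPick layers j).isSome) := by
  induction layers with
  | nil =>
    intro st h1 h2
    refine ⟨h1, h2, fun j hj => ⟨?_, ?_⟩⟩
    · cases hb : st.2.getD j true <;> simp [pvPick]
    · simp [pvPick]
  | cons l rest ih =>
    intro st h1 h2
    rw [List.foldl_cons]
    obtain ⟨i1, i2, ij⟩ := pvInnerB_spec l n st
    rw [pvLayerB_eq] at *
    set st' := (List.range n).foldl (pvStepB l) st with hst'
    obtain ⟨o1, o2, oj⟩ := ih st' (by rw [i1, h1]) (by rw [i2, h2])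
    refine ⟨o1, o2, fun j hj => ?_⟩
    have hj1 : j < st.1.length := by rw [h1]; exact hj
    have hj2 : j < st.2.length := by rw [h2]; exact hj
    have e1 : st'.1.getD j 0 =
        (if j < n ∧ st.2.getD j true = false ∧ l.getD j 2 ≠ 2 then l.getD j 2
         else st.1.getD j 0) := by
      rw [List.getD_eq_getElem?_getD, (ij j).1, List.getElem?_eq_getElem hj1]
      simp only [Option.map_some, Option.getD_some]
      rw [List.getD_eq_getElem st.1 0 hj1]
    have e2 : st'.2.getD j true =
        (if j < n ∧ st.2.getD j true = false ∧ l.getD j 2 ≠ 2 then true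
         else st.2.getD j true) := by
      rw [List.getD_eq_getElem?_getD, (ij j).2, List.getElem?_eq_getElem hj2]
      simp only [Option.map_some, Option.getD_some]
      rw [List.getD_eq_getElem st.2 true hj2]
    obtain ⟨oj1, oj2⟩ := oj j hj
    cases hd : st.2.getD j true with
    | true =>
      have hc : ¬ (j < n ∧ st.2.getD j true = false ∧ l.getD j 2 ≠ 2) := by
        rintro ⟨_, hf, _⟩; rw [hd] at hf; cases hf
      rw [if_neg hc] at e1 e2
      constructor
      · rw [oj1, e1, e2, hd]; simp
      · rw [oj2, e2, hd]; simp
    | false =>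
      by_cases hl : l.getD j 2 ≠ 2
      · have hc : (j < n ∧ st.2.getD j true = false ∧ l.getD j 2 ≠ 2) := ⟨hj, hd, hl⟩
        rw [if_pos hc] at e1 e2
        have hp : pvPick (l :: rest) j = some (l.getD j 2) := by
          simp only [pvPick]; rw [if_pos hl]
        constructor
        · rw [oj1, e1, e2, hp]; simp
        · rw [oj2, e2, hp]; simp
      · have hc : ¬ (j < n ∧ st.2.getD j true = false ∧ l.getD j 2 ≠ 2) := by
          rintro ⟨_, _, hf⟩; exact hl hf
        rw [if_neg hc] at e1 e2
        have hp : pvPick (l :: rest) j = pvPick rest j := by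
          simp only [pvPick]; rw [if_neg hl]
        constructor
        · rw [oj1, e1, e2, hd, hp]
        · rw [oj2, e2, hd, hp]

-- the two ports agree pointwise on a non-empty layer list satisfying the per-pixel condition
theorem pvMain (h : List Int) (t : List (List Int))
    (hok : ∀ i < h.length, pvOk (h :: t) i) :
    get_prominent_color (h :: t) = get_prominent_color_alt (h :: t) := by
  have hfirst : (PySem.List.pyGet? (h :: t) 0).getD [] = h := by
    rw [PySem.List.pyGet?_zero_cons]; rfl
  have hA : get_prominent_color (h :: t) =
      (List.range h.length).foldl (pvStepPick (h :: t)) (List.replicate h.length 3) := by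
    unfold get_prominent_color
    rw [hfirst]
    simp only [List.length_replicate]
    apply PySem.List.foldl_congr_mem
    intro fin i hi
    rw [pvScanA_eq_pick (h :: t) i fin (hok i (List.mem_range.mp hi))]
    rfl
  have hB : get_prominent_color_alt (h :: t) =
      ((h :: t).foldl (pvLayerB h.length)
        (List.replicate h.length 3, List.replicate h.length false)).1 := by
    unfold get_prominent_color_alt
    rw [hfirst]
  obtain ⟨o1, o2, oj⟩ := pvOuterB_spec h.length (h :: t)
    (List.replicate h.length 3, List.replicate h.length false) (by simp) (by simp)
  rw [hA, hB]
  apply List.ext_getElem?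
  intro i
  rw [pvFoldA_getElem?]
  by_cases hi : i < h.length
  · obtain ⟨e1, _⟩ := oj i hi
    have hrep2 : (List.replicate h.length false).getD i true = false := by
      rw [List.getD_eq_getElem?_getD, List.getElem?_replicate]
      simp [hi]
    have hrep1 : (List.replicate h.length (3 : Int)).getD i 0 = 3 := by
      rw [List.getD_eq_getElem?_getD, List.getElem?_replicate]
      simp [hi]
    rw [hrep2, hrep1] at e1
    simp only [Bool.false_eq_true, if_false] at e1
    have hBlen : i < (List.foldl (pvLayerB h.length)
        (List.replicate h.length 3, List.replicate h.length false) (h :: t)).1.length := by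
      rw [o1]; exact hi
    have hBe : (List.foldl (pvLayerB h.length)
        (List.replicate h.length 3, List.replicate h.length false) (h :: t)).1[i]? =
        some ((pvPick (h :: t) i).getD 3) := by
      rw [List.getElem?_eq_getElem hBlen, ← List.getD_eq_getElem _ 0 hBlen, e1]
    rw [hBe, List.getElem?_replicate]
    simp [hi]
  · have l1 : (List.replicate h.length (3 : Int))[i]? = none :=
      List.getElem?_eq_none (by rw [List.length_replicate]; omega)
    have l2 : (List.foldl (pvLayerB h.length)
        (List.replicate h.length 3, List.replicate h.length false) (h :: t)).1[i]? = none :=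
      List.getElem?_eq_none (by rw [o1]; omega)
    rw [l1, l2]
    rfl

-- ===== VERDICT (by name: the statement is the Claim_ definition above) =====
theorem get_prominent_color_spec : Claim_equal_get_prominent_color := by
  intro layers _ hpre
  unfold Spec_get_prominent_color
  obtain ⟨hne, hok⟩ := hpre
  cases layers with
  | nil => exact absurd rfl hne
  | cons h t =>
    exact pvMain h t (fun i hi => hok i (by simpa using hi))
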